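-- pv_equiv track=rewrite | github.com/treejen/ars | src/main/resources/scripts/address_core_utils.py | tokenize_address
-- ===== SOURCE A (Python) =====
-- def tokenize_address(address):
--     """
--     Tokenize an address string into a format suitable for NER tagging.
--     This function handles Hong Kong specific patterns like floor indicators.
--     """
--     # Basic tokenization
--     tokens = []
--     current_token = ""
--
--     for char in address:
--         if char.isalnum() or char in "-'/":
--             current_token += char
--         else:
--             if current_token:
--                 tokens.append(current_token)
--                 current_token = ""
--             if char.strip():  # if not whitespace
--                 tokens.append(char)
--
--     if current_token:
--         tokens.append(current_token)
--
--     # Group tokens for special address patterns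
--     grouped_tokens = []
--     i = 0
--     while i < len(tokens):
--         # Handle floor indicators like "1/F", "G/F", etc.
--         if i < len(tokens) - 2 and tokens[i+1] == "/" and tokens[i+2] == "F":
--             grouped_tokens.append(tokens[i] + "/" + tokens[i+2])
--             i += 3
--         # Handle patterns like "B1/F"
--         elif i < len(tokens) - 3 and tokens[i+1].isdigit() and tokens[i+2] == "/" and tokens[i+3] == "F":
--             grouped_tokens.append(tokens[i] + tokens[i+1] + "/" + tokens[i+3])
--             i += 4
--         else:
--             grouped_tokens.append(tokens[i])
--             i += 1
--
--     return grouped_tokens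
-- ===== SOURCE B (Python) =====
-- # B: classify characters and split the address into runs with itertools.groupby
-- # (one token per alnum/-'/ run, whitespace runs dropped, other chars emitted singly),
-- # then group floor indicators by consuming the token list as a reversed stack.
-- from itertools import groupby
--
--
-- def _kind(ch):
--     if ch.isalnum() or ch in "-'/":
--         return "tok"
--     if not ch.strip():  # whitespace
--         return "ws"
--     return "other"
--
--
-- def _group_floors(tokens):
--     out = []
--     stack = tokens[::-1]  # top of stack = first remaining token
--     while stack:
--         if len(stack) >= 3 and stack[-2] == "/" and stack[-3] == "F":
--             out.append(stack.pop() + "/F")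
--             stack.pop()
--             stack.pop()
--         elif (len(stack) >= 4 and stack[-2].isdigit()
--               and stack[-3] == "/" and stack[-4] == "F"):
--             out.append(stack.pop() + stack.pop() + "/F")
--             stack.pop()
--             stack.pop()
--         else:
--             out.append(stack.pop())
--     return out
--
--
-- def tokenize_address(address):
--     tokens = []
--     for kind, run in groupby(address, key=_kind):
--         if kind == "tok":
--             tokens.append("".join(run))
--         elif kind == "other":
--             tokens.extend(run)
--     return _group_floors(tokens)
-- ===== Notes on version B (the rewrite author's own statement) =====
-- stated objective: alternative
-- what changed: Character-accumulator loop replaced by an itertools.groupby run classification (tok/ws/other runs), and the index-based grouping while-loop replaced by a reversed-stack consumer that pops whole matched floor patterns and builds each merged token as prefix plus a constant suffix instead of re-indexing.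
import Mathlib
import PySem

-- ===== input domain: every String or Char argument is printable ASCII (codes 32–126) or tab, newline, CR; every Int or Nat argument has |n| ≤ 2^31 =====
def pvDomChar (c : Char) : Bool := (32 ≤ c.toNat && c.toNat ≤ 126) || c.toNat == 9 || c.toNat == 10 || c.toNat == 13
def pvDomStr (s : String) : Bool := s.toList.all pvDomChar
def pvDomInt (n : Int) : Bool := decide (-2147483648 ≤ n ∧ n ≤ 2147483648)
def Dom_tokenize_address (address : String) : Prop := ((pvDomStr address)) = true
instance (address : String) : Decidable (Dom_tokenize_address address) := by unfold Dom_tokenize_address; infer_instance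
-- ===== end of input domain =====

-- B replaces A's character-accumulator loop by a groupby-style run split and A's
-- index-based grouping pass by a stack consumer; same output (alternative decomposition).


-- ===== PORT A =====
-- tokens are kept as List Char and turned into String only at the very end
-- (String.mk is injective, so this is exact); `char in "-'/"` on a single char
-- is the three comparisons; `char.strip()` truthy on a single char is ¬ isspace.
def pvStepA (st : List (List Char) × List Char) (c : Char) : List (List Char) × List Char :=
  if PySem.Chars.isalnum c || c == '-' || c == '\'' || c == '/' then
    (st.1, st.2 ++ [c])
  else
    let st1 := if st.2 = [] then st else (st.1 ++ [st.2], ([] : List Char))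
    if PySem.Chars.isspace c then st1 else (st1.1 ++ [[c]], st1.2)

-- the grouping while-loop of A, index i over tokens; `i < len(tokens) - 2` on
-- Python ints is exactly `i + 2 < tokens.length` (likewise for - 3); all indices
-- read under the guards are in range, so getD is Python's tokens[i+k].
def pvGroupA (tokens : List (List Char)) (grouped : List (List Char)) (i : Nat) :
    List (List Char) :=
  if h : i < tokens.length then
    if i + 2 < tokens.length ∧ tokens.getD (i+1) [] = ['/'] ∧ tokens.getD (i+2) [] = ['F'] then
      pvGroupA tokens (grouped ++ [tokens.getD i [] ++ ['/'] ++ tokens.getD (i+2) []]) (i+3)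
    else if i + 3 < tokens.length ∧ PySem.Chars.strIsdigit (tokens.getD (i+1) []) ∧
        tokens.getD (i+2) [] = ['/'] ∧ tokens.getD (i+3) [] = ['F'] then
      pvGroupA tokens (grouped ++ [tokens.getD i [] ++ tokens.getD (i+1) [] ++ ['/'] ++ tokens.getD (i+3) []]) (i+4)
    else
      pvGroupA tokens (grouped ++ [tokens.getD i []]) (i+1)
  else grouped
termination_by tokens.length - i
decreasing_by all_goals omega

def tokenize_address (address : String) : List String :=
  (pvGroupA
    (if (address.toList.foldl pvStepA ([], [])).2 = [] then
      (address.toList.foldl pvStepA ([], [])).1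
     else (address.toList.foldl pvStepA ([], [])).1 ++ [(address.toList.foldl pvStepA ([], [])).2])
    [] 0).map String.mk

-- ===== PORT B =====
-- B's key function: 0 = 'tok', 1 = 'ws', 2 = 'other'
def pvKeyB (c : Char) : Nat :=
  if PySem.Chars.isalnum c || c == '-' || c == '\'' || c == '/' then 0
  else if PySem.Chars.isspace c then 1 else 2

-- itertools.groupby(address, key): maximal runs of equal key
def pvRuns (cs : List Char) : List (List Char) :=
  match cs with
  | [] => []
  | c :: rest =>
      (c :: rest.takeWhile (fun d => pvKeyB d == pvKeyB c)) ::
        pvRuns (rest.dropWhile (fun d => pvKeyB d == pvKeyB c))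
termination_by cs.length
decreasing_by
  simp only [List.length_cons]
  exact Nat.lt_succ_of_le (List.length_dropWhile_le _ _)

-- the body of B's groupby loop: join a tok run, drop a ws run, split an other run
def pvEmit (run : List Char) : List (List Char) :=
  match run with
  | [] => []
  | c :: _ =>
      if pvKeyB c == 0 then [run]
      else if pvKeyB c == 1 then []
      else run.map (fun d => [d])

-- B's reversed stack popped from the top consumes the token list front to back;
-- ported as that front-to-back consumption.
def pvGroupB (ts : List (List Char)) : List (List Char) :=
  match ts with
  | x :: t1 :: t2 :: rest =>
    if t1 = ['/'] ∧ t2 = ['F'] then (x ++ ['/', 'F']) :: pvGroupB rest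
    else
      match rest with
      | t3 :: rest2 =>
        if PySem.Chars.strIsdigit t1 ∧ t2 = ['/'] ∧ t3 = ['F'] then
          (x ++ t1 ++ ['/', 'F']) :: pvGroupB rest2
        else x :: pvGroupB (t1 :: t2 :: t3 :: rest2)
      | [] => x :: pvGroupB [t1, t2]
  | x :: rest => x :: pvGroupB rest
  | [] => []
termination_by ts.length

def tokenize_address_alt (address : String) : List String :=
  (pvGroupB ((pvRuns address.toList).flatMap pvEmit)).map String.mk

-- ===== PRECONDITION & SPEC =====
def Spec_tokenize_address (address : String) (out : List String) : Prop := out = tokenize_address_alt address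
instance (address : String) (out : List String) : Decidable (Spec_tokenize_address address out) := by unfold Spec_tokenize_address; infer_instance

-- ===== CLAIM (what is proved, stated in full; the proofs are below) =====
def Claim_equal_tokenize_address : Prop := ∀ (address : String), Dom_tokenize_address address → Spec_tokenize_address address (tokenize_address address)

-- ===== LEMMAS AND PROOFS =====

-- reference tokenization: what A's foldl produces, as a plain recursion
def tokChunks (cur : List Char) (cs : List Char) : List (List Char) :=
  match cs with
  | [] => if cur = [] then [] else [cur]
  | c :: rest =>
    if PySem.Chars.isalnum c || c == '-' || c == '\'' || c == '/' then
      tokChunks (cur ++ [c]) rest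
    else
      (if cur = [] then [] else [cur]) ++
        (if PySem.Chars.isspace c then [] else [[c]]) ++ tokChunks [] rest

theorem pvStepA_chunks (cs : List Char) : ∀ ts cur,
    (let st := cs.foldl pvStepA (ts, cur);
     if st.2 = [] then st.1 else st.1 ++ [st.2]) = ts ++ tokChunks cur cs := by
  induction cs with
  | nil =>
    intro ts cur
    simp only [List.foldl_nil, tokChunks]
    split_ifs <;> simp
  | cons c rest ih =>
    intro ts cur
    simp only [List.foldl_cons, tokChunks]
    by_cases hc : (PySem.Chars.isalnum c || c == '-' || c == '\'' || c == '/') = true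
    · simp only [pvStepA, hc, if_pos]
      exact ih ts (cur ++ [c])
    · by_cases hs : PySem.Chars.isspace c = true <;>
        by_cases hcur : cur = [] <;>
        simp [pvStepA, hc, hs, hcur, ih, List.append_assoc]

theorem pvKeyB_eq_zero (c : Char) :
    (pvKeyB c == 0) = (PySem.Chars.isalnum c || c == '-' || c == '\'' || c == '/') := by
  unfold pvKeyB
  split_ifs with h <;> simp_all

theorem tokChunks_cons (cs : List Char) : ∀ cur, cur ≠ [] →
    tokChunks cur cs =
      (cur ++ cs.takeWhile (fun d => pvKeyB d == 0)) ::
        tokChunks [] (cs.dropWhile (fun d => pvKeyB d == 0)) := by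
  induction cs with
  | nil => intro cur h; simp [tokChunks, h]
  | cons c rest ih =>
    intro cur h
    by_cases hc : (PySem.Chars.isalnum c || c == '-' || c == '\'' || c == '/') = true
    · have hk : (pvKeyB c == 0) = true := by rw [pvKeyB_eq_zero]; exact hc
      simp only [tokChunks, hc, if_pos, List.takeWhile_cons, List.dropWhile_cons, hk]
      rw [ih (cur ++ [c]) (by simp)]
      simp
    · have hk : (pvKeyB c == 0) = false := by rw [pvKeyB_eq_zero]; simpa using hc
      simp [tokChunks, h, hc, hk]


-- peeling one non-tok character off the front of the run decomposition
theorem runs_peel (c : Char) (cs : List Char) (h : ¬ pvKeyB c = 0) :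
    (pvRuns (c :: cs)).flatMap pvEmit =
      (if PySem.Chars.isspace c then [] else [[c]]) ++ (pvRuns cs).flatMap pvEmit := by
  have htok : (PySem.Chars.isalnum c || c == '-' || c == '\'' || c == '/') = false := by
    by_contra hx
    exact h (by simp [pvKeyB, eq_true_of_ne_false hx])
  cases cs with
  | nil =>
    simp only [pvRuns, List.takeWhile_nil, List.dropWhile_nil, List.flatMap_cons,
      List.flatMap_nil, List.append_nil, pvEmit, pvKeyB, htok]
    split_ifs <;> simp_all [pvKeyB]
  | cons c' cs' =>
    by_cases hk : pvKeyB c' = pvKeyB c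
    · have hpred : (fun d => pvKeyB d == pvKeyB c') = (fun d => pvKeyB d == pvKeyB c) := by
        funext d; rw [hk]
      have hkk : (pvKeyB c' == pvKeyB c) = true := by simp [hk]
      have hrw : pvRuns (c :: c' :: cs') =
          (c :: c' :: cs'.takeWhile (fun d => pvKeyB d == pvKeyB c)) ::
            pvRuns (cs'.dropWhile (fun d => pvKeyB d == pvKeyB c)) := by
        rw [pvRuns, List.takeWhile_cons, List.dropWhile_cons, hkk]
        simp
      have hrw2 : pvRuns (c' :: cs') =
          (c' :: cs'.takeWhile (fun d => pvKeyB d == pvKeyB c)) ::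
            pvRuns (cs'.dropWhile (fun d => pvKeyB d == pvKeyB c)) := by
        rw [pvRuns, hpred]
      rw [hrw, hrw2, List.flatMap_cons, List.flatMap_cons, ← List.append_assoc]
      congr 1
      by_cases hs : PySem.Chars.isspace c = true
      · have h1 : pvKeyB c = 1 := by simp [pvKeyB, htok, hs]
        have hc' : pvKeyB c' = 1 := hk.trans h1
        simp [pvEmit, h1, hc', hs]
      · have h2 : pvKeyB c = 2 := by simp [pvKeyB, htok, hs]
        have hc' : pvKeyB c' = 2 := hk.trans h2
        simp [pvEmit, h2, hc', hs]
    · have hkk : (pvKeyB c' == pvKeyB c) = false := by simp [hk]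
      rw [pvRuns, List.takeWhile_cons, List.dropWhile_cons, hkk]
      simp only [Bool.false_eq_true, if_false, List.flatMap_cons]
      congr 1
      simp only [pvEmit, pvKeyB, htok]
      split_ifs <;> simp_all

theorem tokChunks_eq_runs (n : Nat) : ∀ cs : List Char, cs.length ≤ n →
    tokChunks [] cs = (pvRuns cs).flatMap pvEmit := by
  induction n with
  | zero =>
    intro cs h
    have : cs = [] := List.length_eq_zero_iff.mp (Nat.le_zero.mp h)
    subst this
    simp [tokChunks, pvRuns]
  | succ n ih =>
    intro cs h
    cases cs with
    | nil => simp [tokChunks, pvRuns]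
    | cons c rest =>
      by_cases hc : (PySem.Chars.isalnum c || c == '-' || c == '\'' || c == '/') = true
      · have hk0 : pvKeyB c = 0 := by simp [pvKeyB, hc]
        have lhs1 : tokChunks [] (c :: rest) = tokChunks [c] rest := by
          simp [tokChunks, hc]
        rw [lhs1, tokChunks_cons rest [c] (by simp)]
        rw [pvRuns]
        have hpred : (fun d => pvKeyB d == pvKeyB c) = (fun d => pvKeyB d == 0) := by
          funext d; rw [hk0]
        rw [hpred, List.flatMap_cons]
        have hemit : pvEmit (c :: rest.takeWhile (fun d => pvKeyB d == 0)) =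
            [c :: rest.takeWhile (fun d => pvKeyB d == 0)] := by
          simp [pvEmit, hk0]
        rw [hemit, ih _ (by
          have := List.length_dropWhile_le (fun d => pvKeyB d == 0) rest
          simp only [List.length_cons] at h
          omega)]
        simp
      · have hk : ¬ pvKeyB c = 0 := by
          simp only [pvKeyB]
          split_ifs <;> simp_all
        rw [runs_peel c rest hk, ← ih rest (by simp only [List.length_cons] at h; omega)]
        simp [tokChunks, hc]

theorem groupA_eq_groupB (n : Nat) : ∀ (tokens grouped : List (List Char)) (i : Nat),
    tokens.length - i ≤ n →
    pvGroupA tokens grouped i = grouped ++ pvGroupB (tokens.drop i) := by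
  induction n with
  | zero =>
    intro tokens grouped i h
    have hni : ¬ i < tokens.length := by omega
    rw [pvGroupA]
    simp [hni, List.drop_eq_nil_of_le (by omega : tokens.length ≤ i), pvGroupB]
  | succ n ih =>
    intro tokens grouped i h
    by_cases hi : i < tokens.length
    case neg =>
      rw [pvGroupA]
      simp [hi, List.drop_eq_nil_of_le (by omega : tokens.length ≤ i), pvGroupB]
    case pos =>
      have e0 : tokens.drop i = tokens[i] :: tokens.drop (i+1) := List.drop_eq_getElem_cons hi
      have g0 : tokens.getD i [] = tokens[i] := List.getD_eq_getElem tokens [] hi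
      rw [pvGroupA, dif_pos hi]
      by_cases h1 : i + 2 < tokens.length ∧ tokens.getD (i+1) [] = ['/'] ∧
          tokens.getD (i+2) [] = ['F']
      · obtain ⟨hl, hs, hf⟩ := h1
        have hi1 : i + 1 < tokens.length := by omega
        have hi2 : i + 2 < tokens.length := by omega
        have e1 : tokens.drop (i+1) = tokens[i+1] :: tokens.drop (i+2) :=
          List.drop_eq_getElem_cons hi1
        have e2 : tokens.drop (i+2) = tokens[i+2] :: tokens.drop (i+3) :=
          List.drop_eq_getElem_cons hi2
        have g1 : tokens[i+1] = ['/'] := by rw [← List.getD_eq_getElem tokens [] hi1]; exact hs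
        have g2 : tokens[i+2] = ['F'] := by rw [← List.getD_eq_getElem tokens [] hi2]; exact hf
        rw [if_pos ⟨hl, hs, hf⟩, ih _ _ _ (by omega), e0, e1, e2, g0, g1, g2, hf]
        conv_rhs => rw [pvGroupB.eq_def]
        simp
      · rw [if_neg h1]
        by_cases h2 : i + 3 < tokens.length ∧ PySem.Chars.strIsdigit (tokens.getD (i+1) []) ∧
            tokens.getD (i+2) [] = ['/'] ∧ tokens.getD (i+3) [] = ['F']
        · obtain ⟨hl, hd, hs, hf⟩ := h2
          have hi1 : i + 1 < tokens.length := by omega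
          have hi2 : i + 2 < tokens.length := by omega
          have hi3 : i + 3 < tokens.length := by omega
          have e1 : tokens.drop (i+1) = tokens[i+1] :: tokens.drop (i+2) :=
            List.drop_eq_getElem_cons hi1
          have e2 : tokens.drop (i+2) = tokens[i+2] :: tokens.drop (i+3) :=
            List.drop_eq_getElem_cons hi2
          have e3 : tokens.drop (i+3) = tokens[i+3] :: tokens.drop (i+4) :=
            List.drop_eq_getElem_cons hi3
          have g1 : tokens.getD (i+1) [] = tokens[i+1] := List.getD_eq_getElem tokens [] hi1
          have g2 : tokens[i+2] = ['/'] := by rw [← List.getD_eq_getElem tokens [] hi2]; exact hs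
          have g3 : tokens[i+3] = ['F'] := by rw [← List.getD_eq_getElem tokens [] hi3]; exact hf
          have hne : ¬ (tokens[i+1] = ['/'] ∧ tokens[i+2] = ['F']) := by
            intro ⟨a, b⟩
            exact h1 ⟨hi2, by rw [g1, a], by rw [List.getD_eq_getElem tokens [] hi2, b]⟩
          rw [if_pos ⟨hl, hd, hs, hf⟩, ih _ _ _ (by omega), e0, e1, e2, e3, g0, g1, g2, g3, hf]
          rw [g1] at hd
          conv_rhs => rw [pvGroupB.eq_def]
          simp [hd]
        · rw [if_neg h2, ih _ _ _ (by omega), g0]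
          have hgb : pvGroupB (tokens.drop i) = tokens[i] :: pvGroupB (tokens.drop (i+1)) := by
            rcases hd1 : tokens.drop (i+1) with _ | ⟨t1, rest1⟩
            · rw [e0, hd1]
              conv_lhs => rw [pvGroupB.eq_def]
            · rcases hd2 : rest1 with _ | ⟨t2, rest2⟩
              · rw [e0, hd1, hd2]
                conv_lhs => rw [pvGroupB.eq_def]
              · subst hd2
                have hi1 : i + 1 < tokens.length := by
                  by_contra hx
                  rw [List.drop_eq_nil_of_le (by omega : tokens.length ≤ i + 1)] at hd1
                  simp at hd1
                have e1 : tokens.drop (i+1) = tokens[i+1] :: tokens.drop (i+2) :=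
                  List.drop_eq_getElem_cons hi1
                have ht1 : t1 = tokens[i+1] := by rw [hd1] at e1; exact (List.cons.injEq _ _ _ _ ▸ e1).1
                have hd2' : tokens.drop (i+2) = t2 :: rest2 := by
                  rw [hd1] at e1; exact ((List.cons.injEq _ _ _ _ ▸ e1).2).symm
                have hi2 : i + 2 < tokens.length := by
                  by_contra hx
                  rw [List.drop_eq_nil_of_le (by omega : tokens.length ≤ i + 2)] at hd2'
                  simp at hd2'
                have e2 : tokens.drop (i+2) = tokens[i+2] :: tokens.drop (i+3) :=
                  List.drop_eq_getElem_cons hi2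
                have ht2 : t2 = tokens[i+2] := by
                  rw [hd2'] at e2; exact (List.cons.injEq _ _ _ _ ▸ e2).1
                have hd3' : tokens.drop (i+3) = rest2 := by
                  rw [hd2'] at e2; exact ((List.cons.injEq _ _ _ _ ▸ e2).2).symm
                have hne1 : ¬ (t1 = ['/'] ∧ t2 = ['F']) := by
                  intro ⟨a, b⟩
                  exact h1 ⟨hi2, by rw [List.getD_eq_getElem tokens [] hi1, ← ht1, a],
                    by rw [List.getD_eq_getElem tokens [] hi2, ← ht2, b]⟩
                rcases hd3 : rest2 with _ | ⟨t3, rest3⟩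
                · rw [e0, hd1, hd3]
                  conv_lhs => rw [pvGroupB.eq_def]
                  simp [pvGroupB, hne1]
                · subst hd3
                  have hi3 : i + 3 < tokens.length := by
                    by_contra hx
                    rw [List.drop_eq_nil_of_le (by omega : tokens.length ≤ i + 3)] at hd3'
                    simp at hd3'
                  have e3 : tokens.drop (i+3) = tokens[i+3] :: tokens.drop (i+4) :=
                    List.drop_eq_getElem_cons hi3
                  have ht3 : t3 = tokens[i+3] := by
                    rw [hd3'] at e3; exact (List.cons.injEq _ _ _ _ ▸ e3).1
                  have hne2 : ¬ (PySem.Chars.strIsdigit t1 ∧ t2 = ['/'] ∧ t3 = ['F']) := by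
                    intro ⟨a, b, c⟩
                    refine h2 ⟨hi3, ?_, ?_, ?_⟩
                    · rw [List.getD_eq_getElem tokens [] hi1, ← ht1]; exact a
                    · rw [List.getD_eq_getElem tokens [] hi2, ← ht2]; exact b
                    · rw [List.getD_eq_getElem tokens [] hi3, ← ht3]; exact c
                  rw [e0, hd1]
                  conv_lhs => rw [pvGroupB.eq_def]
                  simp [hne1, hne2]
          rw [hgb]
          simp

-- ===== VERDICT (by name: the statement is the Claim_ definition above) =====
theorem tokenize_address_spec : Claim_equal_tokenize_address := by
  intro address _
  unfold Spec_tokenize_address tokenize_address tokenize_address_alt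
  have h1 := pvStepA_chunks address.toList [] []
  simp only at h1
  rw [h1, List.nil_append, tokChunks_eq_runs (address.toList.length) address.toList le_rfl,
    groupA_eq_groupB ((((pvRuns address.toList).flatMap pvEmit)).length) _ _ 0 (by omega),
    List.drop_zero, List.nil_append]
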